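-- pv_equiv track=rewrite | github.com/SanjaiV2/Projet-SAE | SAE Python 1.py | amis_plus_pop
-- ===== SOURCE A (Python) =====
-- def amis_plus_pop(dico_reseau) :
--     prenom = list(dico_reseau)
--     i = 0
--     Populaire = 0
--     prenom = list(dico_reseau)
--     nb=0
--     while i < len(prenom) :
--         compte  = len(dico_reseau[prenom[i]])
--         if compte > Populaire :
--             Populaire = compte
--             nb=i
--         i = i + 1
--
--     return dico_reseau[prenom[nb]]
-- ===== SOURCE B (Python) =====
-- def amis_plus_pop(dico_reseau):
--     cles = sorted(dico_reseau, key=lambda k: len(dico_reseau[k]), reverse=True)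
--     return dico_reseau[cles[0]]
-- ===== Notes on version B (the rewrite author's own statement) =====
-- stated objective: simpler
-- what changed: Replaces the manual index-tracking while-loop over the key list with a stable reverse sort of the keys by friend-list length and a lookup of the first sorted key; stability with reverse=True preserves A's first-occurrence tie rule.
import Mathlib
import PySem

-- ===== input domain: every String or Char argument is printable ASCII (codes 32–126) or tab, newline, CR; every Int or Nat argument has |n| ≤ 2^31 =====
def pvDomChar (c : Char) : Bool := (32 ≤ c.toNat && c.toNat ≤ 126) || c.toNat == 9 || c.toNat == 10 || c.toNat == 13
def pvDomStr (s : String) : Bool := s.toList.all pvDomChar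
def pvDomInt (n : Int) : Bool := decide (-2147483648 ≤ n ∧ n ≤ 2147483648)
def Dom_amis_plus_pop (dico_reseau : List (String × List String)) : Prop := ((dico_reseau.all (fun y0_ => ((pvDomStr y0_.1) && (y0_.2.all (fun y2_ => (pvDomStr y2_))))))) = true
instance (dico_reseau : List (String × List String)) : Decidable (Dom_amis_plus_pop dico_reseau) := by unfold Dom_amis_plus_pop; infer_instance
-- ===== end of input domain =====

-- B replaces A's manual index-tracking while-loop with a stable reverse sort of the keys
-- by friend-list length followed by a lookup of the first sorted key (objective: simpler).


-- ===== PORT A =====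
-- literal port: prenom = list(dict); while-loop over indexes keeping (Populaire, nb); final lookup
def amis_plus_pop (dico_reseau : List (String × List String)) : List String :=
  let dd := PySem.Dict.ofList dico_reseau
  let prenom := dd.keys
  let s := (PySem.List.pyRange 0 (PySem.List.len prenom) 1).foldl
    (fun (s : Int × Int) i =>
      let compte : Int := PySem.List.len (dd.getD (PySem.List.pyGetD prenom i "") [])
      if compte > s.1 then (compte, i) else s)
    (0, 0)
  dd.getD (PySem.List.pyGetD prenom s.2 "") []

-- ===== PORT B =====
-- literal port of Source B: stable reverse sort of the keys by friend-list length, then first key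
def amis_plus_pop_alt (dico_reseau : List (String × List String)) : List String :=
  let dd := PySem.Dict.ofList dico_reseau
  let cles := PySem.List.sorted dd.keys (fun k => PySem.List.len (dd.getD k [])) true
  dd.getD (PySem.List.pyGetD cles 0 "") []

-- ===== PRECONDITION & SPEC =====
-- A raises IndexError on the empty dict (prenom[0] with prenom = []); B raises there too (cles[0]).
def Pre_amis_plus_pop (dico_reseau : List (String × List String)) : Prop := dico_reseau ≠ []
instance (dico_reseau : List (String × List String)) : Decidable (Pre_amis_plus_pop dico_reseau) := by unfold Pre_amis_plus_pop; infer_instance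
def pvWitness_amis_plus_pop : (List (String × List String)) := [("ana", ["bob"]), ("bob", ["ana", "carl"])]

def Spec_amis_plus_pop (dico_reseau : List (String × List String)) (out : List String) : Prop := out = amis_plus_pop_alt dico_reseau
instance (dico_reseau : List (String × List String)) (out : List String) : Decidable (Spec_amis_plus_pop dico_reseau out) := by unfold Spec_amis_plus_pop; infer_instance

-- ===== CLAIM (what is proved, stated in full; the proofs are below) =====
def Claim_equal_amis_plus_pop : Prop := ∀ (dico_reseau : List (String × List String)), Dom_amis_plus_pop dico_reseau → Pre_amis_plus_pop dico_reseau → Spec_amis_plus_pop dico_reseau (amis_plus_pop dico_reseau)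

-- ===== LEMMAS AND PROOFS =====

-- the common value both programs pick: the first key attaining the maximal g-value
-- (strict-improvement running best, seeded with the first key)
def pvPick (g : String → Int) (b : String) (t : List String) : String :=
  t.foldl (fun u y => if g u < g y then y else u) b

-- head of the insertion step of the reverse-stable sort
lemma pv_head_insertBy (g : String → Int) (x a : String) (rest : List String) :
    (PySem.List.insertBy (fun p q => decide (g q < g p)) x (a :: rest)).head? =
      some (if g a < g x then x else a) := by
  simp only [PySem.List.insertBy]
  by_cases h : g a < g x <;> simp [h]

-- head of the whole reverse-stable sort fold = running strict-improvement best
lemma pv_foldl_insertBy_head (g : String → Int) :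
    ∀ (l acc : List String) (a : String), acc.head? = some a →
      (l.foldl (fun acc x => PySem.List.insertBy (fun p q => decide (g q < g p)) x acc) acc).head?
        = some (pvPick g a l) := by
  intro l
  induction l with
  | nil => intro acc a h; simpa [pvPick] using h
  | cons x t ih =>
    intro acc a h
    cases acc with
    | nil => simp at h
    | cons b rest =>
      simp only [List.head?_cons, Option.some.injEq] at h
      subst h
      simp only [List.foldl_cons, pvPick]
      by_cases hax : g b < g x
      · have := ih (PySem.List.insertBy (fun p q => decide (g q < g p)) x (b :: rest)) x
          (by rw [pv_head_insertBy]; simp [hax])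
        simpa [pvPick, hax] using this
      · have := ih (PySem.List.insertBy (fun p q => decide (g q < g p)) x (b :: rest)) b
          (by rw [pv_head_insertBy]; simp [hax])
        simpa [pvPick, hax] using this

-- A's index loop: from a state holding the running best (its g-value and an index
-- pointing at it), the loop over the remaining index range ends in such a state again.
lemma pv_loopA (xs : List String) (g : String → Int) :
    ∀ (t : List String) (j : Nat) (b : String) (nb : Int),
      PySem.List.pyGetD xs nb "" = b →
      (∀ i : Nat, (h : i < t.length) → PySem.List.pyGetD xs ((j : Int) + i) "" = t[i]) →
      ∃ nb',
        (PySem.List.pyRange (j : Int) ((j : Int) + t.length) 1).foldl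
            (fun (s : Int × Int) i =>
              if g (PySem.List.pyGetD xs i "") > s.1 then (g (PySem.List.pyGetD xs i ""), i) else s)
            (g b, nb)
          = (g (pvPick g b t), nb') ∧ PySem.List.pyGetD xs nb' "" = pvPick g b t := by
  intro t
  induction t with
  | nil =>
    intro j b nb hb _
    refine ⟨nb, ?_, hb⟩
    have hr : PySem.List.pyRange (j : Int) ((j : Int) + (([] : List String)).length) 1 = [] := by
      simp [PySem.List.pyRange]
    simp [pvPick]
  | cons y t ih =>
    intro j b nb hb ht
    have hjy : PySem.List.pyGetD xs (j : Int) "" = y := by simpa using ht 0 (by simp)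
    have hlen : ((j : Int)) < (j : Int) + ((y :: t).length : Int) := by
      simp only [List.length_cons]; push_cast; omega
    have hstop : (j : Int) + ((y :: t).length : Int) = ((j + 1 : Nat) : Int) + (t.length : Int) := by
      push_cast; simp only [List.length_cons]; push_cast; ring
    have hstep1 : ((j : Int) + 1) = ((j + 1 : Nat) : Int) := by push_cast; ring
    rw [PySem.List.pyRange_one_cons hlen, hstop, hstep1]
    simp only [List.foldl_cons, hjy]
    have ht' : ∀ i : Nat, (h : i < t.length) →
        PySem.List.pyGetD xs (((j + 1 : Nat) : Int) + i) "" = t[i] := by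
      intro i hi
      have e : ((j + 1 : Nat) : Int) + (i : Int) = (j : Int) + ((i + 1 : Nat) : Int) := by
        push_cast; ring
      rw [e]
      simpa using ht (i + 1) (by omega)
    by_cases hgt : g y > g b
    · obtain ⟨nb', h1, h2⟩ := ih (j + 1) y (j : Int) hjy ht'
      exact ⟨nb', by simpa [pvPick, hgt, show g b < g y from hgt] using h1,
        by simpa [pvPick, show g b < g y from hgt] using h2⟩
    · obtain ⟨nb', h1, h2⟩ := ih (j + 1) b nb hb ht'
      exact ⟨nb', by simpa [pvPick, hgt, show ¬ g b < g y from not_lt.mpr (not_lt.mp hgt)] using h1,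
        by simpa [pvPick, show ¬ g b < g y from not_lt.mpr (not_lt.mp hgt)] using h2⟩

-- keys of ofList of a nonempty association list are nonempty
lemma pv_keys_ofList_ne_nil (d : List (String × List String)) (hd : d ≠ []) :
    (PySem.Dict.ofList d).keys ≠ [] := by
  have hk : (PySem.Dict.ofList d).keys = PySem.Set.ofList (d.map Prod.fst) := by
    simpa [PySem.Dict.ofList, PySem.Dict.update] using
      PySem.Dict.keys_foldl_insert_key d Prod.fst (fun dd p => p.2) PySem.Dict.empty
  cases d with
  | nil => exact absurd rfl hd
  | cons p ps =>
    intro h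
    have hm : p.1 ∈ (PySem.Dict.ofList (p :: ps)).keys := by
      rw [hk, PySem.Set.mem_ofList]; simp
    simp [h] at hm

-- ===== VERDICT (by name: the statement is the Claim_ definition above) =====
theorem amis_plus_pop_spec : Claim_equal_amis_plus_pop := by
  intro d _ hpre
  unfold Spec_amis_plus_pop amis_plus_pop amis_plus_pop_alt
  set dd := PySem.Dict.ofList d with hdd
  set xs := dd.keys with hxs
  set g : String → Int := fun k => PySem.List.len (dd.getD k []) with hg
  have hne : xs ≠ [] := pv_keys_ofList_ne_nil d hpre
  obtain ⟨k0, rest, hkeys⟩ := List.exists_cons_of_ne_nil hne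
  -- the common best key
  set best := pvPick g k0 rest with hbest
  have h0 : PySem.List.pyGetD xs 0 "" = k0 := by
    rw [hkeys]; simp [PySem.List.pyGetD_ofNat']
  -- A-side
  have hlen0 : (0 : Int) < PySem.List.len xs := by
    rw [hkeys]; simp [PySem.List.len]
  have hstopA : PySem.List.len xs = ((1 : Nat) : Int) + (rest.length : Int) := by
    rw [hkeys]; simp [PySem.List.len]; ring
  have hfirst : (if g (PySem.List.pyGetD xs 0 "") > (0 : Int)
      then (g (PySem.List.pyGetD xs 0 ""), (0 : Int)) else ((0 : Int), (0 : Int)))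
      = (g k0, (0 : Int)) := by
    rw [h0]
    by_cases hp : g k0 > 0
    · simp [hp]
    · have hz : g k0 = 0 := le_antisymm (not_lt.mp hp) (by simp [hg, PySem.List.len])
      simp [hz]
  have htA : ∀ i : Nat, (h : i < rest.length) →
      PySem.List.pyGetD xs (((1 : Nat) : Int) + i) "" = rest[i] := by
    intro i hi
    rw [hkeys]
    have e : ((1 : Nat) : Int) + (i : Int) = ((i + 1 : Nat) : Int) := by push_cast; ring
    rw [e, PySem.List.pyGetD_natCast]
    simp [List.getD, hi]
  obtain ⟨nb', hfold, hres⟩ := pv_loopA xs g rest 1 k0 0 h0 htA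
  have hA : PySem.List.pyGetD xs
      ((PySem.List.pyRange 0 (PySem.List.len xs) 1).foldl
        (fun (s : Int × Int) i =>
          if g (PySem.List.pyGetD xs i "") > s.1 then (g (PySem.List.pyGetD xs i ""), i) else s)
        (0, 0)).2 "" = best := by
    rw [PySem.List.pyRange_one_cons hlen0, hstopA]
    simp only [List.foldl_cons, zero_add, hfirst]
    push_cast at hfold ⊢
    rw [hfold]
    exact hres
  -- B-side
  have hsortfold := PySem.List.sorted_rev_eq_foldl_insertBy xs g
  have hheadB : (PySem.List.sorted xs g true).head? = some best := by
    rw [hsortfold, hkeys]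
    simp only [List.foldl_cons]
    have h1 : PySem.List.insertBy (fun a b => decide (g b < g a)) k0 [] = [k0] := by
      simp [PySem.List.insertBy]
    rw [h1]
    exact pv_foldl_insertBy_head g rest [k0] k0 rfl
  obtain ⟨tl, htl⟩ : ∃ tl, PySem.List.sorted xs g true = best :: tl := by
    cases hs : PySem.List.sorted xs g true with
    | nil => rw [hs] at hheadB; simp at hheadB
    | cons a t =>
      rw [hs] at hheadB; simp only [List.head?_cons, Option.some.injEq] at hheadB
      exact ⟨t, by rw [hheadB]⟩
  have hB : PySem.List.pyGetD (PySem.List.sorted xs g true) 0 "" = best := by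
    rw [htl]; simp [PySem.List.pyGetD_ofNat']
  exact (congrArg (fun k => dd.getD k []) (hA.trans hB.symm))
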